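-- pv_equiv track=rewrite | github.com/fernandezfran/python_UNSAM | ejercicios/Clase06/propagar.py | propagar_al_vecino
-- ===== SOURCE A (Python) =====
-- def propagar_al_vecino(l):
--     modif = False
--     n = len(l)
--     for i,e in enumerate(l):
--         if e==1 and i<n-1 and l[i+1]==0:
--             l[i+1] = 1
--             modif = True
--         if e==1 and i>0 and l[i-1]==0:
--             l[i-1] = 1
--             modif = True
--     return modif
-- ===== SOURCE B (Python) =====
-- def propagar_al_vecino(l):
--     # Single pass with a carry flag over the (unmutated) list; returns whether
--     # A's neighbour-propagation would modify anything. Does not mutate l.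
--     carry = False
--     modif = False
--     n = len(l)
--     for i in range(n):
--         v = l[i]
--         if v == 1:
--             carry = True
--         elif v == 0:
--             if carry or (i + 1 < n and l[i + 1] == 1):
--                 modif = True
--         else:
--             carry = False
--     return modif
-- ===== Notes on version B (the rewrite author's own statement) =====
-- stated objective: simpler
-- what changed: A's mutate-while-iterating cascade (two in-place neighbour-flipping rules re-reading the list it is mutating) is replaced by one read-only pass carrying a boolean 'carry' flag: a 1 sets the flag, a 0 reports a modification if the flag is set or its right neighbour is an original 1, any other value clears the flag; B never mutates the list (A does, in place).
import Mathlib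
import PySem

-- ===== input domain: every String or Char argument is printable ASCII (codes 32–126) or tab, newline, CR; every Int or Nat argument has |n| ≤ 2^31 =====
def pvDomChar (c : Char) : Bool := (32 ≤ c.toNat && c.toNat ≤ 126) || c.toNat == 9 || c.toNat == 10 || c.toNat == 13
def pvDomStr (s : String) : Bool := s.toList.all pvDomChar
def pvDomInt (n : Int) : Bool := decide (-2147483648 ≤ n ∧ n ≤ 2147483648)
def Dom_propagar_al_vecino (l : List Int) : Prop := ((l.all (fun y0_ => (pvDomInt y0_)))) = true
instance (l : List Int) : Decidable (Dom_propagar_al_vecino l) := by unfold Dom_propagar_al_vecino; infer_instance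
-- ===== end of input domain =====

-- B replaces A's mutate-while-iterating neighbour cascade by one read-only carry-flag pass (same O(n) cost, simpler);
-- the equivalence is about the RETURN value only: Python A mutates l in place, Python B does not.

-- ===== PORT A =====
-- loop body of A: `e` is re-read from the current (mutated) list, as Python's enumerate does;
-- the guards `i < n-1` / `0 < i` keep every index in range and `set` preserves length, so getD is exact.
def stepA (n : Nat) (s : List Int × Bool) (i : Nat) : List Int × Bool :=
  let e := s.1[i]?.getD 0
  let s1 := if e == 1 && decide (i < n - 1) && (s.1[(i + 1)]?.getD 0 == 0)
            then (s.1.set (i + 1) 1, true) else s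
  if e == 1 && decide (0 < i) && (s1.1[(i - 1)]?.getD 0 == 0)
  then (s1.1.set (i - 1) 1, true) else s1

def propagar_al_vecino (l : List Int) : Bool :=
  ((List.range l.length).foldl (stepA l.length) (l, false)).2

-- ===== PORT B =====
-- loop body of B: state is (carry, modif); l is only read, never written.
def stepB (l : List Int) (n : Nat) (s : Bool × Bool) (i : Nat) : Bool × Bool :=
  let v := l[i]?.getD 0
  if v == 1 then (true, s.2)
  else if v == 0 then (s.1, s.2 || (s.1 || (decide (i + 1 < n) && (l[(i + 1)]?.getD 0 == 1))))
  else (false, s.2)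

def propagar_al_vecino_alt (l : List Int) : Bool :=
  ((List.range l.length).foldl (stepB l l.length) (false, false)).2

-- ===== PRECONDITION & SPEC =====
def Spec_propagar_al_vecino (l : List Int) (out : Bool) : Prop := out = propagar_al_vecino_alt l
instance (l : List Int) (out : Bool) : Decidable (Spec_propagar_al_vecino l out) := by unfold Spec_propagar_al_vecino; infer_instance

-- ===== CLAIM (what is proved, stated in full; the proofs are below) =====
def Claim_equal_propagar_al_vecino : Prop := ∀ (l : List Int), Dom_propagar_al_vecino l → Spec_propagar_al_vecino l (propagar_al_vecino l)

-- ===== LEMMAS AND PROOFS =====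

-- The coupling invariant between A's state (list, modif) and B's state (carry, modif)
-- before iteration i of the common loop over `List.range l.length`.
def LoopInv (l : List Int) (i : Nat) (a : List Int × Bool) (b : Bool × Bool) : Prop :=
  a.1.length = l.length ∧
  (∀ k, i < k → a.1[k]?.getD 0 = l[k]?.getD 0) ∧
  (i < l.length → a.1[i]?.getD 0 = if b.1 = true ∧ l[i]?.getD 0 = 0 then 1 else l[i]?.getD 0) ∧
  (1 ≤ i → a.1[(i - 1)]?.getD 0 = if b.1 = true then 1 else l[(i - 1)]?.getD 0) ∧
  ((a.2 || (decide (1 ≤ i) && decide (i < l.length) && (l[(i - 1)]?.getD 0 == 0) && !b.1 && (l[i]?.getD 0 == 1)))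
    = (b.2 || (decide (i < l.length) && b.1 && (l[i]?.getD 0 == 0))))

theorem foldl_range_inv {α β : Type} (f : α → Nat → α) (g : β → Nat → β)
    (I : Nat → α → β → Prop) (n : Nat) (a : α) (b : β)
    (h0 : I 0 a b)
    (hstep : ∀ i x y, i < n → I i x y → I (i + 1) (f x i) (g y i)) :
    I n ((List.range n).foldl f a) ((List.range n).foldl g b) := by
  induction n with
  | zero => simpa using h0
  | succ m ih =>
    rw [List.range_succ]
    simp only [List.foldl_append, List.foldl_cons, List.foldl_nil]
    exact hstep m _ _ (Nat.lt_succ_self m)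
      (ih (fun i x y hi => hstep i x y (Nat.lt_succ_of_lt hi)))


theorem getD_set_ne (l : List Int) {j k : Nat} (x : Int) (h : j ≠ k) :
    (l.set j x)[k]?.getD 0 = l[k]?.getD 0 := by
  simp [List.getElem?_set_ne h]

theorem getD_set_self (l : List Int) {j : Nat} (x : Int) (h : j < l.length) :
    (l.set j x)[j]?.getD 0 = x := by
  simp [h]

theorem inv_step (l : List Int) (i : Nat) (a : List Int × Bool) (b : Bool × Bool)
    (hi : i < l.length) (h : LoopInv l i a b) :
    LoopInv l (i + 1) (stepA l.length a i) (stepB l l.length b i) := by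
  obtain ⟨la, ma⟩ := a
  obtain ⟨c, m⟩ := b
  obtain ⟨h1, h2, h3, h4, h5⟩ := h
  simp only at h1 h2 h3 h4 h5
  have he : la[i]?.getD 0 = if c = true ∧ l[i]?.getD 0 = 0 then 1 else l[i]?.getD 0 := h3 hi
  have hup : la[(i + 1)]?.getD 0 = l[(i + 1)]?.getD 0 := h2 _ (Nat.lt_succ_self i)
  have hiff : (i < l.length - 1) ↔ (i + 1 < l.length) := by omega
  have hne2 : i - 1 ≠ i + 1 := by omega
  have hprev : ∀ x : Int, (la.set (i + 1) x)[(i - 1)]?.getD 0 = la[(i - 1)]?.getD 0 :=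
    fun x => getD_set_ne la x hne2.symm
  have h1i1 : 1 ≤ i + 1 := by omega
  cases c with
  | false =>
    have he' : la[i]?.getD 0 = l[i]?.getD 0 := by rw [he]; simp
    have h4' : 1 ≤ i → la[(i - 1)]?.getD 0 = l[(i - 1)]?.getD 0 := by
      intro hx; simpa using h4 hx
    have h5' : (ma || (decide (1 ≤ i) && (l[(i - 1)]?.getD 0 == 0) && (l[i]?.getD 0 == 1))) = m := by
      simpa [hi] using h5
    by_cases hv1 : l[i]?.getD 0 = 1
    · -- c = false, v = 1
      have hB : stepB l l.length (false, m) i = (true, m) := by simp [stepB, hv1]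
      by_cases hQ : i + 1 < l.length ∧ l[(i + 1)]?.getD 0 = 0
      · have hQ2 : l[i + 1]'hQ.1 = (0 : Int) := by
          have hx := hQ.2
          rwa [List.getElem?_eq_getElem hQ.1, Option.getD_some] at hx
        by_cases hD : 0 < i ∧ l[(i - 1)]?.getD 0 = 0
        · have h1i : 1 ≤ i := hD.1
          have hA : stepA l.length (la, ma) i = ((la.set (i + 1) 1).set (i - 1) 1, true) := by
            simp [stepA, he', hv1, hup, hiff, hQ.1, hQ2, hprev, h4' h1i, hD.1, hD.2]
          have hm : m = true := by rw [← h5']; simp [h1i, hD.2, hv1]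
          rw [hA, hB]
          refine ⟨by simp [h1], ?_, ?_, ?_, ?_⟩
          · intro k hk
            rw [getD_set_ne _ _ (by omega), getD_set_ne _ _ (by omega)]
            exact h2 k (by omega)
          · intro hlt
            rw [getD_set_ne _ _ hne2, getD_set_self la 1 (by rw [h1]; exact hQ.1),
              if_pos ⟨rfl, hQ.2⟩]
          · intro _
            simp only [Nat.add_sub_cancel]
            rw [getD_set_ne _ _ (by omega), getD_set_ne _ _ (by omega), he', hv1]
            simp
          · simp [hm]
        · have hc2p : ¬ (0 < i ∧ (la.set (i + 1) 1)[(i - 1)]?.getD 0 = 0) := by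
            rintro ⟨hi0, hx⟩
            rw [hprev 1, h4' hi0] at hx
            exact hD ⟨hi0, hx⟩
          have hA : stepA l.length (la, ma) i = (la.set (i + 1) 1, true) := by
            simp [stepA, he', hv1, hup, hiff, hQ.1, hQ2, hc2p]
          have hmm : ma = m := by
            rw [← h5']
            by_cases hi0 : 0 < i
            · have hpr : l[(i - 1)]?.getD 0 ≠ 0 := fun hx => hD ⟨hi0, hx⟩
              simp [hpr]
            · have : ¬ (1 ≤ i) := hi0
              simp [this]
          rw [hA, hB]
          refine ⟨by simp [h1], ?_, ?_, ?_, ?_⟩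
          · intro k hk
            rw [getD_set_ne _ _ (by omega)]
            exact h2 k (by omega)
          · intro hlt
            rw [getD_set_self la 1 (by rw [h1]; exact hQ.1), if_pos ⟨rfl, hQ.2⟩]
          · intro _
            simp only [Nat.add_sub_cancel]
            rw [getD_set_ne _ _ (by omega), he', hv1]
            simp
          · simp [hQ.1, hQ2]
      · have hc1p : ¬ (i < l.length - 1 ∧ la[(i + 1)]?.getD 0 = 0) := by
          rintro ⟨hx1, hx2⟩
          rw [hup] at hx2
          exact hQ ⟨hiff.mp hx1, hx2⟩
        by_cases hD : 0 < i ∧ l[(i - 1)]?.getD 0 = 0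
        · have h1i : 1 ≤ i := hD.1
          have hA : stepA l.length (la, ma) i = (la.set (i - 1) 1, true) := by
            simp [stepA, he', hv1, hc1p, h4' h1i, hD.1, hD.2]
          have hm : m = true := by rw [← h5']; simp [h1i, hD.2, hv1]
          rw [hA, hB]
          refine ⟨by simp [h1], ?_, ?_, ?_, ?_⟩
          · intro k hk
            rw [getD_set_ne _ _ (by omega)]
            exact h2 k (by omega)
          · intro hlt
            have hu : l[(i + 1)]?.getD 0 ≠ 0 := fun hx => hQ ⟨hlt, hx⟩
            rw [getD_set_ne _ _ hne2, hup, if_neg (fun hx => hu hx.2)]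
          · intro _
            simp only [Nat.add_sub_cancel]
            rw [getD_set_ne _ _ (by omega), he', hv1]
            simp
          · simp [hm]
        · have hc2q : ¬ (0 < i ∧ la[(i - 1)]?.getD 0 = 0) := by
            rintro ⟨hi0, hx⟩
            rw [h4' hi0] at hx
            exact hD ⟨hi0, hx⟩
          have hA : stepA l.length (la, ma) i = (la, ma) := by
            simp [stepA, he', hv1, hc1p, hc2q]
          have hmm : ma = m := by
            rw [← h5']
            by_cases hi0 : 0 < i
            · have hpr : l[(i - 1)]?.getD 0 ≠ 0 := fun hx => hD ⟨hi0, hx⟩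
              simp [hpr]
            · have : ¬ (1 ≤ i) := hi0
              simp [this]
          have hX : (decide (i + 1 < l.length) && (l[(i + 1)]?.getD 0 == 0)) = false := by
            by_cases hQ1 : i + 1 < l.length
            · have hu : l[(i + 1)]?.getD 0 ≠ 0 := fun hx => hQ ⟨hQ1, hx⟩
              simp [hu]
            · simp [hQ1]
          rw [hA, hB]
          refine ⟨h1, fun k hk => h2 k (by omega), ?_, ?_, ?_⟩
          · intro hlt
            have hu : l[(i + 1)]?.getD 0 ≠ 0 := fun hx => hQ ⟨hlt, hx⟩
            rw [hup, if_neg (fun hx => hu hx.2)]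
          · intro _
            simp only [Nat.add_sub_cancel]
            rw [he', hv1]
            simp
          · simp only [Nat.add_sub_cancel]
            simp [hmm, hX]
    · by_cases hv0 : l[i]?.getD 0 = 0
      · -- c = false, v = 0
        have hA : stepA l.length (la, ma) i = (la, ma) := by simp [stepA, he', hv0]
        have hB : stepB l l.length (false, m) i =
            (false, m || (decide (i + 1 < l.length) && (l[(i + 1)]?.getD 0 == 1))) := by
          simp [stepB, hv0]
        have hmm : ma = m := by simpa [hv0] using h5'
        have hv02 : l[i]'hi = (0 : Int) := by
          have hx := hv0
          rwa [List.getElem?_eq_getElem hi, Option.getD_some] at hx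
        rw [hA, hB]
        refine ⟨h1, fun k hk => h2 k (by omega), ?_, ?_, ?_⟩
        · intro hlt; simp [hup]
        · intro _
          simp only [Nat.add_sub_cancel]
          simp [he']
        · simp only [Nat.add_sub_cancel]
          simp [hmm, hv02, h1i1, hi]
      · -- c = false, v other
        have hA : stepA l.length (la, ma) i = (la, ma) := by simp [stepA, he', hv1]
        have hB : stepB l l.length (false, m) i = (false, m) := by simp [stepB, hv1, hv0]
        have hz1 : (l[i]?.getD 0 == 1) = false := by simp [hv1]
        have hmm : ma = m := by simpa [hz1] using h5'
        rw [hA, hB]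
        refine ⟨h1, fun k hk => h2 k (by omega), ?_, ?_, ?_⟩
        · intro hlt; simp [hup]
        · intro _
          simp only [Nat.add_sub_cancel]
          simp [he']
        · simp only [Nat.add_sub_cancel]
          simp [hmm, hv0]
  | true =>
    have h4'' : 1 ≤ i → la[(i - 1)]?.getD 0 = 1 := by
      intro hx; simpa using h4 hx
    have h5' : ma = (m || (l[i]?.getD 0 == 0)) := by
      simpa [hi] using h5
    have hc2s : ¬ (0 < i ∧ (la.set (i + 1) 1)[(i - 1)]?.getD 0 = 0) := by
      rintro ⟨hi0, hx⟩
      rw [hprev 1, h4'' hi0] at hx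
      exact one_ne_zero hx
    have hc2t : ¬ (0 < i ∧ la[(i - 1)]?.getD 0 = 0) := by
      rintro ⟨hi0, hx⟩
      rw [h4'' hi0] at hx
      exact one_ne_zero hx
    by_cases hv1 : l[i]?.getD 0 = 1
    · -- c = true, v = 1
      have he1 : la[i]?.getD 0 = 1 := by rw [he]; simp [hv1]
      have hmm : ma = m := by simpa [hv1] using h5'
      have hB : stepB l l.length (true, m) i = (true, m) := by simp [stepB, hv1]
      by_cases hQ : i + 1 < l.length ∧ l[(i + 1)]?.getD 0 = 0
      · have hQ2 : l[i + 1]'hQ.1 = (0 : Int) := by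
          have hx := hQ.2
          rwa [List.getElem?_eq_getElem hQ.1, Option.getD_some] at hx
        have hA : stepA l.length (la, ma) i = (la.set (i + 1) 1, true) := by
          simp [stepA, he1, hup, hiff, hQ.1, hQ2, hc2s]
        rw [hA, hB]
        refine ⟨by simp [h1], ?_, ?_, ?_, ?_⟩
        · intro k hk
          rw [getD_set_ne _ _ (by omega)]
          exact h2 k (by omega)
        · intro hlt
          rw [getD_set_self la 1 (by rw [h1]; exact hQ.1), if_pos ⟨rfl, hQ.2⟩]
        · intro _
          simp only [Nat.add_sub_cancel]
          rw [getD_set_ne _ _ (by omega), he1]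
          simp
        · simp [hQ.1, hQ2]
      · have hc1p : ¬ (i < l.length - 1 ∧ la[(i + 1)]?.getD 0 = 0) := by
          rintro ⟨hx1, hx2⟩
          rw [hup] at hx2
          exact hQ ⟨hiff.mp hx1, hx2⟩
        have hA : stepA l.length (la, ma) i = (la, ma) := by
          simp [stepA, he1, hc1p, hc2t]
        have hX : (decide (i + 1 < l.length) && (l[(i + 1)]?.getD 0 == 0)) = false := by
          by_cases hQ1 : i + 1 < l.length
          · have hu : l[(i + 1)]?.getD 0 ≠ 0 := fun hx => hQ ⟨hQ1, hx⟩
            simp [hu]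
          · simp [hQ1]
        rw [hA, hB]
        refine ⟨h1, fun k hk => h2 k (by omega), ?_, ?_, ?_⟩
        · intro hlt
          have hu : l[(i + 1)]?.getD 0 ≠ 0 := fun hx => hQ ⟨hlt, hx⟩
          rw [hup, if_neg (fun hx => hu hx.2)]
        · intro _
          simp only [Nat.add_sub_cancel]
          simp [he1]
        · simp only [Nat.add_sub_cancel]
          simp [hmm, hX]
    · by_cases hv0 : l[i]?.getD 0 = 0
      · -- c = true, v = 0
        have he1 : la[i]?.getD 0 = 1 := by rw [he]; simp [hv0]
        have hma : ma = true := by simp [h5', hv0]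
        have hB : stepB l l.length (true, m) i = (true, true) := by simp [stepB, hv0]
        by_cases hQ : i + 1 < l.length ∧ l[(i + 1)]?.getD 0 = 0
        · have hQ2 : l[i + 1]'hQ.1 = (0 : Int) := by
            have hx := hQ.2
            rwa [List.getElem?_eq_getElem hQ.1, Option.getD_some] at hx
          have hA : stepA l.length (la, ma) i = (la.set (i + 1) 1, true) := by
            simp [stepA, he1, hup, hiff, hQ.1, hQ2, hc2s]
          rw [hA, hB]
          refine ⟨by simp [h1], ?_, ?_, ?_, ?_⟩
          · intro k hk
            rw [getD_set_ne _ _ (by omega)]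
            exact h2 k (by omega)
          · intro hlt
            rw [getD_set_self la 1 (by rw [h1]; exact hQ.1), if_pos ⟨rfl, hQ.2⟩]
          · intro _
            simp only [Nat.add_sub_cancel]
            rw [getD_set_ne _ _ (by omega), he1]
            simp
          · simp
        · have hc1p : ¬ (i < l.length - 1 ∧ la[(i + 1)]?.getD 0 = 0) := by
            rintro ⟨hx1, hx2⟩
            rw [hup] at hx2
            exact hQ ⟨hiff.mp hx1, hx2⟩
          have hA : stepA l.length (la, ma) i = (la, ma) := by
            simp [stepA, he1, hc1p, hc2t]
          rw [hA, hB]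
          refine ⟨h1, fun k hk => h2 k (by omega), ?_, ?_, ?_⟩
          · intro hlt
            have hu : l[(i + 1)]?.getD 0 ≠ 0 := fun hx => hQ ⟨hlt, hx⟩
            rw [hup, if_neg (fun hx => hu hx.2)]
          · intro _
            simp only [Nat.add_sub_cancel]
            simp [he1]
          · simp [hma]
      · -- c = true, v other
        have he' : la[i]?.getD 0 = l[i]?.getD 0 := by rw [he]; simp [hv0]
        have hz : (l[i]?.getD 0 == 0) = false := by simp [hv0]
        have hmm : ma = m := by rw [h5', hz]; simp
        have hA : stepA l.length (la, ma) i = (la, ma) := by simp [stepA, he', hv1]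
        have hB : stepB l l.length (true, m) i = (false, m) := by simp [stepB, hv1, hv0]
        rw [hA, hB]
        refine ⟨h1, fun k hk => h2 k (by omega), ?_, ?_, ?_⟩
        · intro hlt; simp [hup]
        · intro _
          simp only [Nat.add_sub_cancel]
          simp [he']
        · simp only [Nat.add_sub_cancel]
          simp [hmm, hv0]

theorem propagar_al_vecino_spec : Claim_equal_propagar_al_vecino := by
  intro l _
  unfold Spec_propagar_al_vecino propagar_al_vecino propagar_al_vecino_alt
  have H := foldl_range_inv (stepA l.length) (stepB l l.length) (LoopInv l) l.length
      (l, false) (false, false)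
      ⟨rfl, fun k _ => rfl, fun _ => by simp, fun hx => absurd hx (by omega), by simp⟩
      (fun i x y hi h => inv_step l i x y hi h)
  obtain ⟨-, -, -, -, h5⟩ := H
  simpa using h5
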